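-- pv_equiv track=rewrite | github.com/GitAnda/advent_of_code | 2022/day8.py | list_visible
-- ===== SOURCE A (Python) =====
-- def list_visible(line, reversed=False):
--     max_height = -1
--     count = []
--     for i, tree in enumerate(line):
--         if tree > max_height:
--             count.append(i) if not reversed else count.append(len(line) - i - 1)
--             max_height = tree
--     return count
-- ===== SOURCE B (Python) =====
-- def list_visible(line, reversed=False):
--     # Two-pass decomposition: build the running-maximum prefix table (seeded at -1),
--     # then select the positions where a new strict maximum appears.
--     pre = [-1]
--     for t in line:
--         pre.append(max(pre[-1], t))
--     n = len(line)
--     return [n - i - 1 if reversed else i for i in range(n) if pre[i + 1] > pre[i]]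
-- ===== Notes on version B (the rewrite author's own statement) =====
-- stated objective: alternative
-- what changed: B first builds the running-maximum prefix table seeded at -1, then a separate comprehension selects the indices where consecutive prefix maxima strictly increase, instead of A's single loop maintaining a scalar max and appending inline.
import Mathlib
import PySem

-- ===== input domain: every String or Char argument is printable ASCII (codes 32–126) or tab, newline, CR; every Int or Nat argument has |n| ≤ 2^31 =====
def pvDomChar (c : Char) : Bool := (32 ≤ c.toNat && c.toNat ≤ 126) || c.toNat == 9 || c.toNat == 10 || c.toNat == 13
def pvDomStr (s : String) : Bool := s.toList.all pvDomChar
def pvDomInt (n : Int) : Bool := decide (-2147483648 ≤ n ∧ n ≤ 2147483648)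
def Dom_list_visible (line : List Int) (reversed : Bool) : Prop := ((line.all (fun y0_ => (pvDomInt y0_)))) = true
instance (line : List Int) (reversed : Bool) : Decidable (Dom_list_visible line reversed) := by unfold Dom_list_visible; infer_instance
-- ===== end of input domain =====

-- B replaces the inline scalar running-maximum with a prefix-maxima table built first,
-- followed by a consecutive-comparison selection pass (objective: alternative decomposition).

-- ===== PORT A =====
-- for i, tree in enumerate(line): if tree > max_height: append(i or len-i-1); max_height = tree
def list_visible (line : List Int) (reversed : Bool) : List Int :=
  (PySem.List.enumerate line 0).foldl
    (fun (st : Int × List Int) p =>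
      if p.2 > st.1 then
        (p.2, st.2 ++ [if !reversed then p.1 else (line.length : Int) - p.1 - 1])
      else st)
    (-1, [])
  |>.2

-- ===== PORT B =====
-- pre = [-1]; for t in line: pre.append(max(pre[-1], t))   (pre[-1]: list always nonempty, so getLastD is exact)
-- then [n-i-1 if reversed else i for i in range(n) if pre[i+1] > pre[i]]  (indices always in range, so getD is exact)
def list_visible_alt (line : List Int) (reversed : Bool) : List Int :=
  let pre := line.foldl (fun acc t => acc ++ [max (acc.getLastD 0) t]) [-1]
  let n := line.length
  (List.range n).filterMap (fun i =>
    if pre.getD (i + 1) 0 > pre.getD i 0 then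
      some (if reversed then (n : Int) - i - 1 else (i : Int))
    else none)

-- ===== PRECONDITION & SPEC =====
def Spec_list_visible (line : List Int) (reversed : Bool) (out : List Int) : Prop := out = list_visible_alt line reversed
instance (line : List Int) (reversed : Bool) (out : List Int) : Decidable (Spec_list_visible line reversed out) := by unfold Spec_list_visible; infer_instance

-- ===== CLAIM (what is proved, stated in full; the proofs are below) =====
def Claim_equal_list_visible : Prop := ∀ (line : List Int) (reversed : Bool), Dom_list_visible line reversed → Spec_list_visible line reversed (list_visible line reversed)

-- ===== LEMMAS AND PROOFS =====

/-- Common reference: relative indices (from 0) of strict new maxima, starting from `mx`. -/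
def visIdx (mx : Int) : List Int → List Nat
  | [] => []
  | t :: r => if t > mx then 0 :: (visIdx t r).map (· + 1) else (visIdx mx r).map (· + 1)

/-- Running-max scan starting after seed `mx`. -/
def scanMax (mx : Int) : List Int → List Int
  | [] => []
  | t :: r => max mx t :: scanMax (max mx t) r

/-- Shifting the index argument through a `map (· + 1)`. -/
lemma mapShift (f : Int → Int) (k : Int) (xs : List Nat) :
    (xs.map (· + 1)).map (fun j : Nat => f (k + (j : Int))) = xs.map (fun j : Nat => f (k + 1 + (j : Int))) := by
  rw [List.map_map]
  apply List.map_congr_left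
  intro j _
  simp only [Function.comp_apply]
  congr 1
  push_cast
  ring

lemma foldA (l : List Int) (f : Int → Int) :
    ∀ (k mx : Int) (acc : List Int),
      ((PySem.List.enumerate l k).foldl
        (fun (st : Int × List Int) p =>
          if p.2 > st.1 then (p.2, st.2 ++ [f p.1]) else st) (mx, acc)).2
      = acc ++ (visIdx mx l).map (fun j : Nat => f (k + (j : Int))) := by
  induction l with
  | nil => intro k mx acc; simp [PySem.List.enumerate_nil, visIdx]
  | cons t r ih =>
    intro k mx acc
    rw [PySem.List.enumerate_cons, List.foldl_cons]
    by_cases h : t > mx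
    · simp only [h, if_pos]
      rw [ih (k + 1) t (acc ++ [f k])]
      simp only [visIdx, if_pos h, List.map_cons, mapShift, List.append_assoc,
        List.singleton_append, Nat.cast_zero, add_zero]
    · simp only [if_neg (by omega : ¬ t > mx)]
      rw [ih (k + 1) mx acc]
      simp only [visIdx, if_neg h, mapShift]
lemma preEq (l : List Int) :
    ∀ (init : List Int) (x : Int),
      l.foldl (fun acc t => acc ++ [max (acc.getLastD 0) t]) (init ++ [x])
      = init ++ [x] ++ scanMax x l := by
  induction l with
  | nil => intro init x; simp [scanMax]
  | cons t r ih =>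
    intro init x
    simp only [List.foldl_cons]
    have hlast : (init ++ [x]).getLastD 0 = x := by simp
    rw [hlast]
    have := ih (init ++ [x]) (max x t)
    simp only [List.append_assoc] at this ⊢
    simpa [scanMax] using this

lemma selectEq (l : List Int) :
    ∀ (mx : Int) (g : Nat → Int),
      (List.range l.length).filterMap (fun i =>
        if (mx :: scanMax mx l).getD (i + 1) 0 > (mx :: scanMax mx l).getD i 0 then
          some (g i) else none)
      = (visIdx mx l).map g := by
  induction l with
  | nil => intro mx g; simp [visIdx]
  | cons t r ih =>
    intro mx g
    rw [List.length_cons, List.range_succ_eq_map, List.filterMap_cons, List.filterMap_map]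
    have hfun : ((fun i => if (mx :: scanMax mx (t :: r)).getD (i + 1) 0 > (mx :: scanMax mx (t :: r)).getD i 0 then some (g i) else none) ∘ Nat.succ)
        = (fun i => if (max mx t :: scanMax (max mx t) r).getD (i + 1) 0 > (max mx t :: scanMax (max mx t) r).getD i 0 then some (g (i + 1)) else none) := by
      funext i; rfl
    rw [hfun, ih (max mx t) (fun j => g (j + 1))]
    by_cases h : t > mx
    · have hm : max mx t = t := by omega
      simp [scanMax, hm, h, visIdx, List.map_map, Function.comp]
    · have hm : max mx t = mx := by omega
      simp [scanMax, hm, visIdx, if_neg h, List.map_map, Function.comp]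

-- ===== VERDICT (by name: the statement is the Claim_ definition above) =====
theorem list_visible_spec : Claim_equal_list_visible := by
  intro line reversed _
  unfold Spec_list_visible list_visible
  rw [foldA line (fun i => if !reversed then i else (line.length : Int) - i - 1) 0 (-1) []]
  simp only [list_visible_alt]
  have hpre := preEq line [] (-1)
  simp only [List.nil_append, List.singleton_append] at hpre
  rw [hpre, selectEq line (-1) (fun i => if reversed then (line.length : Int) - i - 1 else (i : Int))]
  simp only [List.nil_append]
  apply List.map_congr_left
  intro j _
  cases reversed <;> simp
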